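-- pv_equiv track=rewrite | github.com/adn6868/TrashCan | ICPC/D.py | solve
-- ===== SOURCE A (Python) =====
-- def solve(n):
--
-- 	adict ={}
-- 	for card in n:
-- 		if card[0] not in adict.keys():
-- 			adict[card[0]] = 1
-- 		else:
-- 			adict[card[0]] += 1
-- 	maxx = 0
-- 	for card in adict.keys():
-- 		if maxx < adict[card]:
-- 			maxx = adict[card]
-- 	return maxx
--
--
-- 	return n
-- ===== SOURCE B (Python) =====
-- def solve(n):
--     # sort the first characters, then one run-length scan over the sorted list
--     cs = sorted(card[0] for card in n)
--     prev = None
--     run = 0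
--     best = 0
--     for c in cs:
--         run = run + 1 if prev == c else 1
--         prev = c
--         best = max(best, run)
--     return best
-- ===== Notes on version B (the rewrite author's own statement) =====
-- stated objective: alternative
-- what changed: Replaces the hash-table frequency count plus max-over-keys loop with sorting the first characters and a single run-length scan that tracks the longest run of equal keys.
import Mathlib
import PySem

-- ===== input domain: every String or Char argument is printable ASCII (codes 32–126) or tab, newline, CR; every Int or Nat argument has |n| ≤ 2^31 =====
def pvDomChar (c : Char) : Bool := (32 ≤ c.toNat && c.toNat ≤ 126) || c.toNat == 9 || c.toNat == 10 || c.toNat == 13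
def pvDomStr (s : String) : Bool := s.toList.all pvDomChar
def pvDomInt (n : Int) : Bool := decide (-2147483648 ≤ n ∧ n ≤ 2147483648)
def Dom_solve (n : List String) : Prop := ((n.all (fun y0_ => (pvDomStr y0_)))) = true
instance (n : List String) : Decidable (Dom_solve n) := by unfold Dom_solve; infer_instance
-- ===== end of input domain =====

-- B replaces A's hash-table frequency count with sort-the-first-characters + one run-length scan (alternative algorithm, similar cost).


-- ===== PORT A =====
-- card[0]; total stand-in for Python's s[0] — Pre_solve excludes empty strings, where Python raises IndexError
def pvFirst (s : String) : Char := (PySem.Str.pyGet? s 0).getD ' '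

def solve (n : List String) : Int :=
  let adict := n.foldl (fun d card =>
    let c := pvFirst card
    if d.contains c = false then d.insert c 1 else d.insert c (d.getD c 0 + 1))
    PySem.Dict.empty
  adict.keys.foldl (fun maxx card =>
    if maxx < adict.getD card 0 then adict.getD card 0 else maxx) 0

-- ===== PORT B =====
def solve_alt (n : List String) : Int :=
  let cs := PySem.List.sorted (n.map pvFirst) (fun c => c) false
  let r := cs.foldl (fun (s : Option Char × Int × Int) c =>
      let run := if s.1 = some c then s.2.1 + 1 else 1
      (some c, run, max s.2.2 run)) (none, 0, 0)
  r.2.2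

-- ===== PRECONDITION & SPEC =====
-- Pre_ excludes exactly the inputs containing an empty string, where Python A raises IndexError on card[0].
def Pre_solve (n : List String) : Prop := "" ∉ n
instance (n : List String) : Decidable (Pre_solve n) := by unfold Pre_solve; infer_instance
def pvWitness_solve : List String := ["ab", "cd", "ax"]
def Spec_solve (n : List String) (out : Int) : Prop := out = solve_alt n
instance (n : List String) (out : Int) : Decidable (Spec_solve n out) := by unfold Spec_solve; infer_instance

-- ===== CLAIM (what is proved, stated in full; the proofs are below) =====
def Claim_equal_solve : Prop := ∀ (n : List String), Dom_solve n → Pre_solve n → Spec_solve n (solve n)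

-- ===== LEMMAS AND PROOFS =====

-- F xs = foldl max 0, the value both programs maximise
def pvF (xs : List Int) : Int := xs.foldl max 0

-- M l = max over distinct chars of their count in l (A's value, shown below)
def pvM (l : List Char) : Int := pvF ((PySem.Set.ofList l).map (fun c => (l.count c : Int)))

theorem pvF_init (a b : Int) (l : List Int) :
    l.foldl max (max a b) = max (l.foldl max a) b := by
  induction l generalizing a with
  | nil => rfl
  | cons x l ih =>
    simp only [List.foldl]
    rw [show max (max a b) x = max (max a x) b by omega, ih]

theorem pvF_map_update (c : Char) (f : Char → Int) (S : List Char) (hc : c ∈ S) :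
    pvF (S.map (fun d => f d + if d = c then 1 else 0)) = max (pvF (S.map f)) (f c + 1) := by
  induction S with
  | nil => cases hc
  | cons d S ih =>
    simp only [pvF, List.map, List.foldl] at *
    by_cases hdc : d = c
    · subst hdc
      simp only [if_true]
      rw [pvF_init, pvF_init]
      by_cases hcS : d ∈ S
      · rw [ih hcS]; omega
      · have : S.map (fun e => f e + if e = d then 1 else 0) = S.map f := by
          apply List.map_congr_left
          intro e he
          rw [if_neg (by rintro rfl; exact hcS he)]
          omega
        rw [this]; omega
    · have hcS : c ∈ S := by cases hc with | head => exact absurd rfl hdc | tail _ h => exact h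
      rw [if_neg hdc, add_zero, pvF_init, pvF_init, ih hcS]
      omega

theorem pv_le_getLast (l : List Char) (h : l.Pairwise (· ≤ ·)) (x : Char) (hx : x ∈ l)
    (hne : l ≠ []) : x ≤ l.getLast hne := by
  induction l with
  | nil => cases hx
  | cons a l ih =>
    rcases List.pairwise_cons.mp h with ⟨ha, hl⟩
    rcases eq_or_ne l [] with rfl | hlne
    · simp at hx; subst hx; simp [List.getLast]
    · rw [List.getLast_cons hlne]
      cases hx with
      | head => exact ha _ (List.getLast_mem hlne)
      | tail _ hx => exact ih hl hx hlne

-- the run-length scan step of B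
def pvStep (s : Option Char × Int × Int) (c : Char) : Option Char × Int × Int :=
  let run := if s.1 = some c then s.2.1 + 1 else 1
  (some c, run, max s.2.2 run)

theorem pvSet_ofList_append (l : List Char) (c : Char) :
    PySem.Set.ofList (l ++ [c]) =
      if c ∈ l then PySem.Set.ofList l else PySem.Set.ofList l ++ [c] := by
  rw [PySem.Set.ofList_eq_foldl, List.foldl_append, ← PySem.Set.ofList_eq_foldl]
  show PySem.Set.add _ c = _
  unfold PySem.Set.add
  by_cases h : c ∈ l
  · rw [if_pos h, if_pos]
    simp [PySem.Set.mem_ofList, h]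
  · rw [if_neg h, if_neg]
    simp [PySem.Set.mem_ofList, h]

-- main invariant of B's scan on a sorted list
theorem pvScan_spec (l : List Char) (h : l.Pairwise (· ≤ ·)) (hne : l ≠ []) :
    l.foldl pvStep (none, 0, 0) =
      (some (l.getLast hne), (l.count (l.getLast hne) : Int), pvM l) := by
  induction l using List.reverseRecOn with
  | nil => exact absurd rfl hne
  | append_singleton l c ih =>
    rw [List.foldl_append]
    have hsl : l.Pairwise (· ≤ ·) := (List.pairwise_append.mp h).1
    have hle : ∀ x ∈ l, x ≤ c := fun x hx =>
      (List.pairwise_append.mp h).2.2 x hx c (by simp)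
    rcases eq_or_ne l [] with rfl | hl
    · simp [pvStep, pvM, pvF, PySem.Set.ofList]
    · rw [ih hsl hl]
      have hlast : l.getLast hl ∈ l := List.getLast_mem hl
      simp only [List.getLast_append_singleton, List.foldl_cons, List.foldl_nil]
      unfold pvStep
      by_cases hc : c ∈ l
      · -- c equals the last element of l: the run extends
        have heq : l.getLast hl = c :=
          le_antisymm (hle _ hlast) (pv_le_getLast l hsl c hc hl)
        have hcount : ((l ++ [c]).count c : Int) = (l.count c : Int) + 1 := by
          simp [List.count_append]
        have hM : pvM (l ++ [c]) = max (pvM l) ((l.count c : Int) + 1) := by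
          unfold pvM
          rw [pvSet_ofList_append, if_pos hc]
          have : (PySem.Set.ofList l).map (fun d => ((l ++ [c]).count d : Int)) =
              (PySem.Set.ofList l).map (fun d => (l.count d : Int) + if d = c then 1 else 0) := by
            apply List.map_congr_left
            intro d _
            by_cases hdc : d = c
            · subst hdc; simp [List.count_append]
            · have hcd : ¬ c = d := fun hcontra => hdc hcontra.symm
              simp [List.count_append, hdc, hcd]
          rw [this, pvF_map_update c _ _ ((PySem.Set.mem_ofList _ _).mpr hc)]
        rw [heq, if_pos rfl, hcount, hM]
      · -- c is a new, strictly larger key: the run resets to 1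
        have hne2 : ¬ (some (l.getLast hl) = some c) := by
          intro hcontra
          exact hc (Option.some_injective _ hcontra ▸ hlast)
        have hcount : ((l ++ [c]).count c : Int) = 1 := by
          simp [List.count_append, List.count_eq_zero_of_not_mem hc]
        have hM : pvM (l ++ [c]) = max (pvM l) 1 := by
          unfold pvM
          rw [pvSet_ofList_append, if_neg hc, List.map_append]
          have : (PySem.Set.ofList l).map (fun d => ((l ++ [c]).count d : Int)) =
              (PySem.Set.ofList l).map (fun d => (l.count d : Int)) := by
            apply List.map_congr_left
            intro d hd
            have hdc : d ≠ c := fun hcontra =>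
              hc (hcontra ▸ (PySem.Set.mem_ofList _ _).mp hd)
            have hcd : ¬ c = d := fun hcontra => hdc hcontra.symm
            simp [List.count_append, hcd]
          rw [this]
          show pvF (_ ++ [((l ++ [c]).count c : Int)]) = _
          rw [hcount]
          unfold pvF
          rw [List.foldl_append]
          rfl
        rw [if_neg hne2, hcount, hM]

-- pvF is invariant under permutation of the folded list
theorem pvF_perm (xs ys : List Int) (h : xs.Perm ys) : pvF xs = pvF ys :=
  h.foldl_eq' (fun x _ y _ z => by omega) 0

-- pvM depends only on the multiset of characters
theorem pvM_perm (l l' : List Char) (h : l.Perm l') : pvM l = pvM l' := by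
  unfold pvM
  have hsets : (PySem.Set.ofList l).Perm (PySem.Set.ofList l') := by
    apply (List.perm_ext_iff_of_nodup (PySem.Set.nodup_ofList _) (PySem.Set.nodup_ofList _)).mpr
    intro a
    rw [PySem.Set.mem_ofList, PySem.Set.mem_ofList]
    exact ⟨fun ha => h.mem_iff.mp ha, fun ha => h.mem_iff.mpr ha⟩
  apply pvF_perm
  have hmapeq : ((PySem.Set.ofList l).map (fun c => (l.count c : Int))) =
      ((PySem.Set.ofList l).map (fun c => (l'.count c : Int))) := by
    apply List.map_congr_left
    intro d _
    rw [h.count_eq]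
  rw [hmapeq]
  exact hsets.map _

-- A computes pvM of the list of first characters
theorem pvA_eq (n : List String) : solve n = pvM (n.map pvFirst) := by
  unfold solve
  have hfold : n.foldl (fun d card =>
      let c := pvFirst card
      if d.contains c = false then d.insert c 1 else d.insert c (d.getD c 0 + 1))
      PySem.Dict.empty = PySem.Dict.counter (n.map pvFirst) := by
    rw [← PySem.Dict.foldl_insert_getD_add_one_eq_counter, List.foldl_map]
    apply PySem.List.foldl_congr_mem
    intro d card _
    simp only []
    by_cases hcont : d.contains (pvFirst card) = false
    · rw [if_pos hcont, PySem.Dict.getD_of_not_contains d 0 hcont]; norm_num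
    · rw [if_neg hcont]
  rw [hfold]
  show List.foldl (fun maxx card =>
      if maxx < (PySem.Dict.counter (n.map pvFirst)).getD card 0
      then (PySem.Dict.counter (n.map pvFirst)).getD card 0 else maxx) 0
      (PySem.Dict.counter (n.map pvFirst)).keys = pvM (n.map pvFirst)
  rw [PySem.Dict.keys_counter]
  unfold pvM pvF
  rw [List.foldl_map]
  apply PySem.List.foldl_congr_mem
  intro m c _
  rw [PySem.Dict.getD_counter]
  simp only [max_def]
  split_ifs <;> omega

-- B computes pvM of the same list
theorem pvB_eq (n : List String) : solve_alt n = pvM (n.map pvFirst) := by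
  unfold solve_alt
  simp only []
  set fs := n.map pvFirst with hfs
  set cs := PySem.List.sorted fs (fun c => c) false with hcs
  have hperm : cs.Perm fs := PySem.List.sorted_perm fs _ false
  have hsorted : cs.Pairwise (· ≤ ·) := PySem.List.sorted_pairwise fs (fun c => c)
  rcases eq_or_ne cs [] with hnil | hne
  · have hlen := hperm.length_eq
    rw [hnil] at hlen
    have hfsnil : fs = [] := List.length_eq_zero_iff.mp hlen.symm
    rw [hnil, hfsnil]
    simp [pvM, pvF, PySem.Set.ofList]
  · have hstep : cs.foldl (fun (s : Option Char × Int × Int) c =>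
        let run := if s.1 = some c then s.2.1 + 1 else 1
        (some c, run, max s.2.2 run)) (none, 0, 0) = cs.foldl pvStep (none, 0, 0) := rfl
    rw [hstep, pvScan_spec cs hsorted hne]
    exact pvM_perm cs fs hperm

-- ===== VERDICT (by name: the statement is the Claim_ definition above) =====
theorem solve_spec : Claim_equal_solve := by
  intro n _ _
  unfold Spec_solve
  rw [pvA_eq, pvB_eq]
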